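-- pv_equiv track=rewrite | github.com/maricnikola/Nine-men-s-morris | state.py | mica
-- ===== SOURCE A (Python) =====
-- def mica(polje,hash_map):
--     sve_mice=[
--         [0,1,2],
--         [3,4,5],
--         [6,7,8],
--         [9,10,11],
--         [12,13,14],
--         [15,16,17],
--         [18,19,20],
--         [21,22,23],
--         [0,9,21],
--         [3,10,18],
--         [6,11,15],
--         [1,4,7],
--         [16,19,22],
--         [8,12,17],
--         [5,13,20],
--         [2,14,23],
--     ]
--     for mica in sve_mice:
--         if polje in mica:
--             if hash_map[mica[0]]==hash_map[mica[1]]==hash_map[mica[2]]: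
--                 return True
--
--     return False
-- ===== SOURCE B (Python) =====
-- # No scan over the 16-line table: the row mill through polje is computed
-- # arithmetically (base = polje - polje % 3), and the column mill comes from a
-- # per-field partner table; each field lies in exactly one row and one column.
-- _COL = {
--     0: (0, 9, 21), 9: (0, 9, 21), 21: (0, 9, 21),
--     3: (3, 10, 18), 10: (3, 10, 18), 18: (3, 10, 18),
--     6: (6, 11, 15), 11: (6, 11, 15), 15: (6, 11, 15),
--     1: (1, 4, 7), 4: (1, 4, 7), 7: (1, 4, 7),
--     16: (16, 19, 22), 19: (16, 19, 22), 22: (16, 19, 22),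
--     8: (8, 12, 17), 12: (8, 12, 17), 17: (8, 12, 17),
--     5: (5, 13, 20), 13: (5, 13, 20), 20: (5, 13, 20),
--     2: (2, 14, 23), 14: (2, 14, 23), 23: (2, 14, 23),
-- }
--
--
-- def mica(polje, hash_map):
--     if not (0 <= polje <= 23):
--         return False
--     r = polje - polje % 3
--     if hash_map[r] == hash_map[r + 1] == hash_map[r + 2]:
--         return True
--     a, b, c = _COL[polje]
--     return hash_map[a] == hash_map[b] == hash_map[c]
-- ===== Notes on version B (the rewrite author's own statement) =====
-- stated objective: simpler
-- what changed: B removes the loop over the 16-line mill table entirely: it computes the row mill through polje arithmetically (base = polje - polje % 3) and reads the column mill from a per-field partner table, checking just those two lines directly.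
import Mathlib
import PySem

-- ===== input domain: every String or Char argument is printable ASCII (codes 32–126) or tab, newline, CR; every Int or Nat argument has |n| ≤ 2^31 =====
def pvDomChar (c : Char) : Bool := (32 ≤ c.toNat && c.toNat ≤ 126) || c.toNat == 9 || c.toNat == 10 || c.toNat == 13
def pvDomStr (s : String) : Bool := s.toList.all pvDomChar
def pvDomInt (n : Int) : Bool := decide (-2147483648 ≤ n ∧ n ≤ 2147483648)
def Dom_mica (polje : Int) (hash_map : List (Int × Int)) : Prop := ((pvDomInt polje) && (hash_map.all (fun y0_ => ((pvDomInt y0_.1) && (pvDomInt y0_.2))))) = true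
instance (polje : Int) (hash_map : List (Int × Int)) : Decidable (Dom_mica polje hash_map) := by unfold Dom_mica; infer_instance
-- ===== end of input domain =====

set_option maxRecDepth 10000
set_option maxHeartbeats 1000000


-- B drops A's scan over the 16-line mill table: the row mill through polje is computed
-- arithmetically (base = polje - polje % 3) and the column mill comes from a per-field
-- partner table; objective: simpler (no loop at all).

-- ===== PORT A =====
-- the 16 mill lines of A
def sveMice : List (Int × Int × Int) :=
  [(0, 1, 2), (3, 4, 5), (6, 7, 8), (9, 10, 11),
   (12, 13, 14), (15, 16, 17), (18, 19, 20), (21, 22, 23),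
   (0, 9, 21), (3, 10, 18), (6, 11, 15), (1, 4, 7),
   (16, 19, 22), (8, 12, 17), (5, 13, 20), (2, 14, 23)]

-- A's loop: for each line, if polje in line, test the three-way equality chain;
-- KeyError is excluded by Pre_mica, so the lookups are getD with an arbitrary default 0.
def micaLoopA (polje : Int) (hash_map : List (Int × Int)) : List (Int × Int × Int) → Bool
  | [] => false
  | (a, b, c) :: rest =>
    if polje = a ∨ polje = b ∨ polje = c then
      if (PySem.Dict.mk hash_map).getD a 0 = (PySem.Dict.mk hash_map).getD b 0 ∧
         (PySem.Dict.mk hash_map).getD b 0 = (PySem.Dict.mk hash_map).getD c 0 then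
        true
      else micaLoopA polje hash_map rest
    else micaLoopA polje hash_map rest

def mica (polje : Int) (hash_map : List (Int × Int)) : Bool :=
  micaLoopA polje hash_map sveMice

-- ===== PORT B =====
-- B's per-field column-mill table _COL
def micaColTable : PySem.Dict Int (Int × Int × Int) :=
  PySem.Dict.mk
    [(0, (0, 9, 21)), (9, (0, 9, 21)), (21, (0, 9, 21)),
     (3, (3, 10, 18)), (10, (3, 10, 18)), (18, (3, 10, 18)),
     (6, (6, 11, 15)), (11, (6, 11, 15)), (15, (6, 11, 15)),
     (1, (1, 4, 7)), (4, (1, 4, 7)), (7, (1, 4, 7)),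
     (16, (16, 19, 22)), (19, (16, 19, 22)), (22, (16, 19, 22)),
     (8, (8, 12, 17)), (12, (8, 12, 17)), (17, (8, 12, 17)),
     (5, (5, 13, 20)), (13, (5, 13, 20)), (20, (5, 13, 20)),
     (2, (2, 14, 23)), (14, (2, 14, 23)), (23, (2, 14, 23))]

-- the chain hash_map[a]==hash_map[b]==hash_map[c]; KeyError excluded by Pre_mica
def micaChainB (hash_map : List (Int × Int)) (a b c : Int) : Bool :=
  ((PySem.Dict.mk hash_map).getD a 0 == (PySem.Dict.mk hash_map).getD b 0) &&
  ((PySem.Dict.mk hash_map).getD b 0 == (PySem.Dict.mk hash_map).getD c 0)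

def mica_alt (polje : Int) (hash_map : List (Int × Int)) : Bool :=
  if 0 ≤ polje ∧ polje ≤ 23 then
    let r := polje - PySem.Int.mod polje 3
    if micaChainB hash_map r (r + 1) (r + 2) then true
    else
      -- _COL[polje]: present for every polje in 0..23, so getD's default is never used
      match PySem.Dict.getD micaColTable polje (0, 0, 0) with
      | (a, b, c) => micaChainB hash_map a b c
  else false

-- ===== PRECONDITION & SPEC =====
-- helper conditions: the chain hash_map[a]==hash_map[b]==hash_map[c] runs without KeyError
-- (c is only looked up when the first comparison is true), and evaluates to True
def millOk (hash_map : List (Int × Int)) (m : Int × Int × Int) : Bool :=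
  ((PySem.Dict.mk hash_map).get? m.1).isSome && ((PySem.Dict.mk hash_map).get? m.2.1).isSome &&
  (!((PySem.Dict.mk hash_map).getD m.1 0 == (PySem.Dict.mk hash_map).getD m.2.1 0) ||
    ((PySem.Dict.mk hash_map).get? m.2.2).isSome)

def millTrue (hash_map : List (Int × Int)) (m : Int × Int × Int) : Bool :=
  ((PySem.Dict.mk hash_map).getD m.1 0 == (PySem.Dict.mk hash_map).getD m.2.1 0) &&
  ((PySem.Dict.mk hash_map).getD m.2.1 0 == (PySem.Dict.mk hash_map).getD m.2.2 0) &&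
  ((PySem.Dict.mk hash_map).get? m.2.2).isSome

def preLines (hash_map : List (Int × Int)) : List (Int × Int × Int) → Bool
  | [] => true
  | [m] => millOk hash_map m
  | m1 :: m2 :: _ => millOk hash_map m1 && (millTrue hash_map m1 || millOk hash_map m2)

-- Pre_mica: exactly the inputs on which Python A returns (no KeyError): the looked-up keys
-- of the lines containing polje exist, where A evaluates the second line's lookups only if
-- the first line's chain did not already return True.
def Pre_mica (polje : Int) (hash_map : List (Int × Int)) : Prop :=
  preLines hash_map (sveMice.filter (fun m => polje = m.1 ∨ polje = m.2.1 ∨ polje = m.2.2)) = true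

instance (polje : Int) (hash_map : List (Int × Int)) : Decidable (Pre_mica polje hash_map) := by
  unfold Pre_mica; infer_instance

def pvWitness_mica : Int × (List (Int × Int)) :=
  (0, [(0, 1), (1, 1), (2, 1), (9, 2), (21, 3)])

def Spec_mica (polje : Int) (hash_map : List (Int × Int)) (out : Bool) : Prop := out = mica_alt polje hash_map
instance (polje : Int) (hash_map : List (Int × Int)) (out : Bool) : Decidable (Spec_mica polje hash_map out) := by unfold Spec_mica; infer_instance

-- ===== CLAIM (what is proved, stated in full; the proofs are below) =====
def Claim_equal_mica : Prop := ∀ (polje : Int) (hash_map : List (Int × Int)), Dom_mica polje hash_map → Pre_mica polje hash_map → Spec_mica polje hash_map (mica polje hash_map)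

-- ===== LEMMAS AND PROOFS =====

-- proof-only helper: a loop over a list of lines testing each chain
def micaLoopF (hash_map : List (Int × Int)) : List (Int × Int × Int) → Bool
  | [] => false
  | (a, b, c) :: rest =>
    if micaChainB hash_map a b c then true else micaLoopF hash_map rest

-- A's loop equals the helper loop run on the filtered list of lines containing polje
lemma micaLoopA_eq_filter (polje : Int) (hash_map : List (Int × Int))
    (ms : List (Int × Int × Int)) :
    micaLoopA polje hash_map ms
      = micaLoopF hash_map (ms.filter (fun m => polje = m.1 ∨ polje = m.2.1 ∨ polje = m.2.2)) := by
  induction ms with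
  | nil => rfl
  | cons m rest ih =>
    obtain ⟨a, b, c⟩ := m
    by_cases h : polje = a ∨ polje = b ∨ polje = c
    · by_cases h2 : (PySem.Dict.mk hash_map).getD a 0 = (PySem.Dict.mk hash_map).getD b 0 ∧
          (PySem.Dict.mk hash_map).getD b 0 = (PySem.Dict.mk hash_map).getD c 0
      · simp [micaLoopA, micaLoopF, micaChainB, h, h2.1, h2.2]
      · have : micaChainB hash_map a b c = false := by
          simp only [micaChainB, Bool.and_eq_false_iff, beq_eq_false_iff_ne]
          tauto
        simp [micaLoopA, micaLoopF, h, h2, this, ih]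
    · simp [micaLoopA, h, ih]

-- B equals the helper loop run on the same filtered list
lemma micaAlt_eq_filter (polje : Int) (hash_map : List (Int × Int)) :
    mica_alt polje hash_map
      = micaLoopF hash_map (sveMice.filter (fun m => polje = m.1 ∨ polje = m.2.1 ∨ polje = m.2.2)) := by
  by_cases h0 : polje = 0
  · subst h0
    rw [show sveMice.filter (fun m => (0:Int) = m.1 ∨ (0:Int) = m.2.1 ∨ (0:Int) = m.2.2)
          = [((0:Int), (1:Int), (2:Int)), ((0:Int), (9:Int), (21:Int))] from rfl]
    show (if micaChainB hash_map 0 1 2 then true else micaChainB hash_map 0 9 21) = _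
    simp only [micaLoopF]
    cases micaChainB hash_map 0 1 2 <;> simp
  by_cases h1 : polje = 1
  · subst h1
    rw [show sveMice.filter (fun m => (1:Int) = m.1 ∨ (1:Int) = m.2.1 ∨ (1:Int) = m.2.2)
          = [((0:Int), (1:Int), (2:Int)), ((1:Int), (4:Int), (7:Int))] from rfl]
    show (if micaChainB hash_map 0 1 2 then true else micaChainB hash_map 1 4 7) = _
    simp only [micaLoopF]
    cases micaChainB hash_map 0 1 2 <;> simp
  by_cases h2 : polje = 2
  · subst h2
    rw [show sveMice.filter (fun m => (2:Int) = m.1 ∨ (2:Int) = m.2.1 ∨ (2:Int) = m.2.2)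
          = [((0:Int), (1:Int), (2:Int)), ((2:Int), (14:Int), (23:Int))] from rfl]
    show (if micaChainB hash_map 0 1 2 then true else micaChainB hash_map 2 14 23) = _
    simp only [micaLoopF]
    cases micaChainB hash_map 0 1 2 <;> simp
  by_cases h3 : polje = 3
  · subst h3
    rw [show sveMice.filter (fun m => (3:Int) = m.1 ∨ (3:Int) = m.2.1 ∨ (3:Int) = m.2.2)
          = [((3:Int), (4:Int), (5:Int)), ((3:Int), (10:Int), (18:Int))] from rfl]
    show (if micaChainB hash_map 3 4 5 then true else micaChainB hash_map 3 10 18) = _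
    simp only [micaLoopF]
    cases micaChainB hash_map 3 4 5 <;> simp
  by_cases h4 : polje = 4
  · subst h4
    rw [show sveMice.filter (fun m => (4:Int) = m.1 ∨ (4:Int) = m.2.1 ∨ (4:Int) = m.2.2)
          = [((3:Int), (4:Int), (5:Int)), ((1:Int), (4:Int), (7:Int))] from rfl]
    show (if micaChainB hash_map 3 4 5 then true else micaChainB hash_map 1 4 7) = _
    simp only [micaLoopF]
    cases micaChainB hash_map 3 4 5 <;> simp
  by_cases h5 : polje = 5
  · subst h5
    rw [show sveMice.filter (fun m => (5:Int) = m.1 ∨ (5:Int) = m.2.1 ∨ (5:Int) = m.2.2)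
          = [((3:Int), (4:Int), (5:Int)), ((5:Int), (13:Int), (20:Int))] from rfl]
    show (if micaChainB hash_map 3 4 5 then true else micaChainB hash_map 5 13 20) = _
    simp only [micaLoopF]
    cases micaChainB hash_map 3 4 5 <;> simp
  by_cases h6 : polje = 6
  · subst h6
    rw [show sveMice.filter (fun m => (6:Int) = m.1 ∨ (6:Int) = m.2.1 ∨ (6:Int) = m.2.2)
          = [((6:Int), (7:Int), (8:Int)), ((6:Int), (11:Int), (15:Int))] from rfl]
    show (if micaChainB hash_map 6 7 8 then true else micaChainB hash_map 6 11 15) = _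
    simp only [micaLoopF]
    cases micaChainB hash_map 6 7 8 <;> simp
  by_cases h7 : polje = 7
  · subst h7
    rw [show sveMice.filter (fun m => (7:Int) = m.1 ∨ (7:Int) = m.2.1 ∨ (7:Int) = m.2.2)
          = [((6:Int), (7:Int), (8:Int)), ((1:Int), (4:Int), (7:Int))] from rfl]
    show (if micaChainB hash_map 6 7 8 then true else micaChainB hash_map 1 4 7) = _
    simp only [micaLoopF]
    cases micaChainB hash_map 6 7 8 <;> simp
  by_cases h8 : polje = 8
  · subst h8
    rw [show sveMice.filter (fun m => (8:Int) = m.1 ∨ (8:Int) = m.2.1 ∨ (8:Int) = m.2.2)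
          = [((6:Int), (7:Int), (8:Int)), ((8:Int), (12:Int), (17:Int))] from rfl]
    show (if micaChainB hash_map 6 7 8 then true else micaChainB hash_map 8 12 17) = _
    simp only [micaLoopF]
    cases micaChainB hash_map 6 7 8 <;> simp
  by_cases h9 : polje = 9
  · subst h9
    rw [show sveMice.filter (fun m => (9:Int) = m.1 ∨ (9:Int) = m.2.1 ∨ (9:Int) = m.2.2)
          = [((9:Int), (10:Int), (11:Int)), ((0:Int), (9:Int), (21:Int))] from rfl]
    show (if micaChainB hash_map 9 10 11 then true else micaChainB hash_map 0 9 21) = _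
    simp only [micaLoopF]
    cases micaChainB hash_map 9 10 11 <;> simp
  by_cases h10 : polje = 10
  · subst h10
    rw [show sveMice.filter (fun m => (10:Int) = m.1 ∨ (10:Int) = m.2.1 ∨ (10:Int) = m.2.2)
          = [((9:Int), (10:Int), (11:Int)), ((3:Int), (10:Int), (18:Int))] from rfl]
    show (if micaChainB hash_map 9 10 11 then true else micaChainB hash_map 3 10 18) = _
    simp only [micaLoopF]
    cases micaChainB hash_map 9 10 11 <;> simp
  by_cases h11 : polje = 11
  · subst h11
    rw [show sveMice.filter (fun m => (11:Int) = m.1 ∨ (11:Int) = m.2.1 ∨ (11:Int) = m.2.2)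
          = [((9:Int), (10:Int), (11:Int)), ((6:Int), (11:Int), (15:Int))] from rfl]
    show (if micaChainB hash_map 9 10 11 then true else micaChainB hash_map 6 11 15) = _
    simp only [micaLoopF]
    cases micaChainB hash_map 9 10 11 <;> simp
  by_cases h12 : polje = 12
  · subst h12
    rw [show sveMice.filter (fun m => (12:Int) = m.1 ∨ (12:Int) = m.2.1 ∨ (12:Int) = m.2.2)
          = [((12:Int), (13:Int), (14:Int)), ((8:Int), (12:Int), (17:Int))] from rfl]
    show (if micaChainB hash_map 12 13 14 then true else micaChainB hash_map 8 12 17) = _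
    simp only [micaLoopF]
    cases micaChainB hash_map 12 13 14 <;> simp
  by_cases h13 : polje = 13
  · subst h13
    rw [show sveMice.filter (fun m => (13:Int) = m.1 ∨ (13:Int) = m.2.1 ∨ (13:Int) = m.2.2)
          = [((12:Int), (13:Int), (14:Int)), ((5:Int), (13:Int), (20:Int))] from rfl]
    show (if micaChainB hash_map 12 13 14 then true else micaChainB hash_map 5 13 20) = _
    simp only [micaLoopF]
    cases micaChainB hash_map 12 13 14 <;> simp
  by_cases h14 : polje = 14
  · subst h14
    rw [show sveMice.filter (fun m => (14:Int) = m.1 ∨ (14:Int) = m.2.1 ∨ (14:Int) = m.2.2)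
          = [((12:Int), (13:Int), (14:Int)), ((2:Int), (14:Int), (23:Int))] from rfl]
    show (if micaChainB hash_map 12 13 14 then true else micaChainB hash_map 2 14 23) = _
    simp only [micaLoopF]
    cases micaChainB hash_map 12 13 14 <;> simp
  by_cases h15 : polje = 15
  · subst h15
    rw [show sveMice.filter (fun m => (15:Int) = m.1 ∨ (15:Int) = m.2.1 ∨ (15:Int) = m.2.2)
          = [((15:Int), (16:Int), (17:Int)), ((6:Int), (11:Int), (15:Int))] from rfl]
    show (if micaChainB hash_map 15 16 17 then true else micaChainB hash_map 6 11 15) = _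
    simp only [micaLoopF]
    cases micaChainB hash_map 15 16 17 <;> simp
  by_cases h16 : polje = 16
  · subst h16
    rw [show sveMice.filter (fun m => (16:Int) = m.1 ∨ (16:Int) = m.2.1 ∨ (16:Int) = m.2.2)
          = [((15:Int), (16:Int), (17:Int)), ((16:Int), (19:Int), (22:Int))] from rfl]
    show (if micaChainB hash_map 15 16 17 then true else micaChainB hash_map 16 19 22) = _
    simp only [micaLoopF]
    cases micaChainB hash_map 15 16 17 <;> simp
  by_cases h17 : polje = 17
  · subst h17
    rw [show sveMice.filter (fun m => (17:Int) = m.1 ∨ (17:Int) = m.2.1 ∨ (17:Int) = m.2.2)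
          = [((15:Int), (16:Int), (17:Int)), ((8:Int), (12:Int), (17:Int))] from rfl]
    show (if micaChainB hash_map 15 16 17 then true else micaChainB hash_map 8 12 17) = _
    simp only [micaLoopF]
    cases micaChainB hash_map 15 16 17 <;> simp
  by_cases h18 : polje = 18
  · subst h18
    rw [show sveMice.filter (fun m => (18:Int) = m.1 ∨ (18:Int) = m.2.1 ∨ (18:Int) = m.2.2)
          = [((18:Int), (19:Int), (20:Int)), ((3:Int), (10:Int), (18:Int))] from rfl]
    show (if micaChainB hash_map 18 19 20 then true else micaChainB hash_map 3 10 18) = _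
    simp only [micaLoopF]
    cases micaChainB hash_map 18 19 20 <;> simp
  by_cases h19 : polje = 19
  · subst h19
    rw [show sveMice.filter (fun m => (19:Int) = m.1 ∨ (19:Int) = m.2.1 ∨ (19:Int) = m.2.2)
          = [((18:Int), (19:Int), (20:Int)), ((16:Int), (19:Int), (22:Int))] from rfl]
    show (if micaChainB hash_map 18 19 20 then true else micaChainB hash_map 16 19 22) = _
    simp only [micaLoopF]
    cases micaChainB hash_map 18 19 20 <;> simp
  by_cases h20 : polje = 20
  · subst h20
    rw [show sveMice.filter (fun m => (20:Int) = m.1 ∨ (20:Int) = m.2.1 ∨ (20:Int) = m.2.2)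
          = [((18:Int), (19:Int), (20:Int)), ((5:Int), (13:Int), (20:Int))] from rfl]
    show (if micaChainB hash_map 18 19 20 then true else micaChainB hash_map 5 13 20) = _
    simp only [micaLoopF]
    cases micaChainB hash_map 18 19 20 <;> simp
  by_cases h21 : polje = 21
  · subst h21
    rw [show sveMice.filter (fun m => (21:Int) = m.1 ∨ (21:Int) = m.2.1 ∨ (21:Int) = m.2.2)
          = [((21:Int), (22:Int), (23:Int)), ((0:Int), (9:Int), (21:Int))] from rfl]
    show (if micaChainB hash_map 21 22 23 then true else micaChainB hash_map 0 9 21) = _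
    simp only [micaLoopF]
    cases micaChainB hash_map 21 22 23 <;> simp
  by_cases h22 : polje = 22
  · subst h22
    rw [show sveMice.filter (fun m => (22:Int) = m.1 ∨ (22:Int) = m.2.1 ∨ (22:Int) = m.2.2)
          = [((21:Int), (22:Int), (23:Int)), ((16:Int), (19:Int), (22:Int))] from rfl]
    show (if micaChainB hash_map 21 22 23 then true else micaChainB hash_map 16 19 22) = _
    simp only [micaLoopF]
    cases micaChainB hash_map 21 22 23 <;> simp
  by_cases h23 : polje = 23
  · subst h23
    rw [show sveMice.filter (fun m => (23:Int) = m.1 ∨ (23:Int) = m.2.1 ∨ (23:Int) = m.2.2)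
          = [((21:Int), (22:Int), (23:Int)), ((2:Int), (14:Int), (23:Int))] from rfl]
    show (if micaChainB hash_map 21 22 23 then true else micaChainB hash_map 2 14 23) = _
    simp only [micaLoopF]
    cases micaChainB hash_map 21 22 23 <;> simp
  have hr : ¬ (0 ≤ polje ∧ polje ≤ 23) := by omega
  have hf : sveMice.filter (fun m => polje = m.1 ∨ polje = m.2.1 ∨ polje = m.2.2) = [] := by
    simp [sveMice, List.filter, h0, h1, h2, h3, h4, h5, h6, h7, h8, h9, h10, h11,
      h12, h13, h14, h15, h16, h17, h18, h19, h20, h21, h22, h23]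
  rw [hf]
  simp [mica_alt, hr, micaLoopF]

-- ===== VERDICT (by name: the statement is the Claim_ definition above) =====
theorem mica_spec : Claim_equal_mica := by
  intro polje hash_map _ _
  unfold Spec_mica mica
  rw [micaLoopA_eq_filter, micaAlt_eq_filter]
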